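-- pv_equiv track=rewrite | github.com/nhsbsa/claims-prototype | app/views/alpha/version-08/records/generate_claims_4.py | calculate_invoice_stats
-- ===== SOURCE A (Python) =====
-- def calculate_invoice_stats(invoices):
--     return {
--         "total": len(invoices),
--         "toCheck": sum(1 for inv in invoices if inv['status'] == "To Check"),
--         "accepted": sum(1 for inv in invoices if inv['status'] == "Accepted"),
--         "contested": sum(1 for inv in invoices if inv['status'] == "Contested"),
--         "partial": sum(1 for inv in invoices if inv['status'] == "Partial"),
--         "withdrawn": sum(1 for inv in invoices if inv['status'] == "Withdrawn")
--     }
-- ===== SOURCE B (Python) =====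
-- def calculate_invoice_stats(invoices):
--     total = toCheck = accepted = contested = partial = withdrawn = 0
--     for inv in invoices:
--         total += 1
--         s = inv['status']
--         if s == "To Check":
--             toCheck += 1
--         elif s == "Accepted":
--             accepted += 1
--         elif s == "Contested":
--             contested += 1
--         elif s == "Partial":
--             partial += 1
--         elif s == "Withdrawn":
--             withdrawn += 1
--     return {
--         "total": total,
--         "toCheck": toCheck,
--         "accepted": accepted,
--         "contested": contested,
--         "partial": partial,
--         "withdrawn": withdrawn
--     }
-- ===== Notes on version B (the rewrite author's own statement) =====
-- stated objective: alternative
-- what changed: Replaces len() plus five independent generator scans over invoices (one per status) with a single pass that maintains six counters and builds the result dict at the end.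
import Mathlib
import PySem

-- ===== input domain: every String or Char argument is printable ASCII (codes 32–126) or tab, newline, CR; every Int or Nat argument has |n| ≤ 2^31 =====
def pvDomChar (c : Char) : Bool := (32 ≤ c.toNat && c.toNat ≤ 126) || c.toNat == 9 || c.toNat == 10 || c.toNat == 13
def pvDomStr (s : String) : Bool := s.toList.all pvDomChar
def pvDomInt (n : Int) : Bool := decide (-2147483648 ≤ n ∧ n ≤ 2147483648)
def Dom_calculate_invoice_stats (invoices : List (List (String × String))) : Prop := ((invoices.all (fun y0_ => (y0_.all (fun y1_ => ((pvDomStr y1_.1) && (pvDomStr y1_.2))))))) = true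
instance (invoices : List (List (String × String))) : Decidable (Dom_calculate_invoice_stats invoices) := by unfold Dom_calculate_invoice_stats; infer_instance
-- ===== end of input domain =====

-- B replaces A's len() plus five independent scans of invoices with one single pass
-- maintaining six counters (same results; one traversal instead of six).


-- ===== PORT A =====
-- inv['status']: first-match lookup; inside Pre_ the key is present, so getD "" is exact
def cisStatus (inv : List (String × String)) : String :=
  ((PySem.Dict.mk inv).get? "status").getD ""

-- sum(1 for inv in invoices if inv['status'] == s)
def cisSum (invoices : List (List (String × String))) (s : String) : Int :=
  invoices.foldl (fun n inv => if cisStatus inv == s then n + 1 else n) 0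

def calculate_invoice_stats (invoices : List (List (String × String))) : List (String × Int) :=
  [("total", (invoices.length : Int)),
   ("toCheck", cisSum invoices "To Check"),
   ("accepted", cisSum invoices "Accepted"),
   ("contested", cisSum invoices "Contested"),
   ("partial", cisSum invoices "Partial"),
   ("withdrawn", cisSum invoices "Withdrawn")]

-- ===== PORT B =====
-- one loop iteration of Source B: bump total, then the bucket selected by the if/elif chain
def cisStep (st : Int × Int × Int × Int × Int × Int) (inv : List (String × String)) :
    Int × Int × Int × Int × Int × Int :=
  let (tot, chk, acc, con, par, wdn) := st
  let tot := tot + 1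
  let s := cisStatus inv
  if s == "To Check" then (tot, chk + 1, acc, con, par, wdn)
  else if s == "Accepted" then (tot, chk, acc + 1, con, par, wdn)
  else if s == "Contested" then (tot, chk, acc, con + 1, par, wdn)
  else if s == "Partial" then (tot, chk, acc, con, par + 1, wdn)
  else if s == "Withdrawn" then (tot, chk, acc, con, par, wdn + 1)
  else (tot, chk, acc, con, par, wdn)

def calculate_invoice_stats_alt (invoices : List (List (String × String))) : List (String × Int) :=
  let (tot, chk, acc, con, par, wdn) :=
    invoices.foldl cisStep (0, 0, 0, 0, 0, 0)
  [("total", tot), ("toCheck", chk), ("accepted", acc),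
   ("contested", con), ("partial", par), ("withdrawn", wdn)]

-- ===== PRECONDITION & SPEC =====
-- Pre_ excludes invoices lacking a 'status' key, on which Python A (and B) raise KeyError.
def Pre_calculate_invoice_stats (invoices : List (List (String × String))) : Prop :=
  (invoices.all (fun inv => (PySem.Dict.mk inv).contains "status")) = true
instance (invoices : List (List (String × String))) : Decidable (Pre_calculate_invoice_stats invoices) := by unfold Pre_calculate_invoice_stats; infer_instance

def pvWitness_calculate_invoice_stats : (List (List (String × String))) :=
  [[("status", "To Check")], [("status", "Accepted"), ("id", "7")], [("status", "other")]]

def Spec_calculate_invoice_stats (invoices : List (List (String × String))) (out : List (String × Int)) : Prop := out = calculate_invoice_stats_alt invoices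
instance (invoices : List (List (String × String))) (out : List (String × Int)) : Decidable (Spec_calculate_invoice_stats invoices out) := by unfold Spec_calculate_invoice_stats; infer_instance

-- ===== CLAIM (what is proved, stated in full; the proofs are below) =====
def Claim_equal_calculate_invoice_stats : Prop := ∀ (invoices : List (List (String × String))), Dom_calculate_invoice_stats invoices → Pre_calculate_invoice_stats invoices → Spec_calculate_invoice_stats invoices (calculate_invoice_stats invoices)

-- ===== LEMMAS AND PROOFS =====
theorem cisSum_shift (invoices : List (List (String × String))) (s : String) (n : Int) :
    invoices.foldl (fun n inv => if cisStatus inv == s then n + 1 else n) n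
      = n + invoices.foldl (fun n inv => if cisStatus inv == s then n + 1 else n) 0 := by
  induction invoices generalizing n with
  | nil => simp
  | cons x xs ih =>
    rw [List.foldl_cons, List.foldl_cons, ih, ih (if cisStatus x == s then (0:Int) + 1 else 0)]
    split_ifs <;> ring

theorem cisSum_cons (x : List (String × String)) (xs : List (List (String × String))) (s : String) :
    cisSum (x :: xs) s = (if cisStatus x == s then 1 else 0) + cisSum xs s := by
  simp only [cisSum, List.foldl_cons]
  rw [cisSum_shift]
  split_ifs <;> ring

theorem cisFold_eq (invoices : List (List (String × String)))
    (t a b c d e : Int) :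
    invoices.foldl cisStep (t, a, b, c, d, e)
      = (t + invoices.length, a + cisSum invoices "To Check", b + cisSum invoices "Accepted",
         c + cisSum invoices "Contested", d + cisSum invoices "Partial",
         e + cisSum invoices "Withdrawn") := by
  induction invoices generalizing t a b c d e with
  | nil => simp [cisSum]
  | cons x xs ih =>
    rw [List.foldl_cons]
    simp only [cisStep, cisSum_cons]
    split_ifs <;> rw [ih] <;>
      simp_all only [beq_iff_eq, String.reduceEq, Prod.mk.injEq, List.length_cons] <;> push_cast <;> and_intros <;> ring

-- ===== VERDICT (by name: the statement is the Claim_ definition above) =====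
theorem calculate_invoice_stats_spec : Claim_equal_calculate_invoice_stats := by
  intro invoices _ _
  unfold Spec_calculate_invoice_stats calculate_invoice_stats calculate_invoice_stats_alt
  rw [cisFold_eq]
  simp
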